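-- pv_equiv track=rewrite | github.com/kalki-kgp/whatsapp-mcp | voice/assistant.py | match_wake_word
-- ===== SOURCE A (Python) =====
-- def _edit_distance(a: str, b: str) -> int:
--     """Simple Levenshtein distance."""
--     if len(a) < len(b):
--         return _edit_distance(b, a)
--     if not b:
--         return len(a)
--     prev = list(range(len(b) + 1))
--     for i, ca in enumerate(a):
--         curr = [i + 1]
--         for j, cb in enumerate(b):
--             curr.append(min(prev[j + 1] + 1, curr[j] + 1, prev[j] + (ca != cb)))
--         prev = curr
--     return prev[-1]
--
-- def match_wake_word(transcript: str, wake_word: str) -> tuple[bool, str]: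
--     """
--     Fuzzy-match wake word at the start of transcript.
--     Returns (matched, remaining_text).
--
--     Handles common STT misheards via per-word edit distance tolerance.
--     Uses per-word edit distance tolerance:
--       - words <= 3 chars: exact or distance 1
--       - words > 3 chars: distance <= 1
--     """
--     t_words = transcript.lower().split()
--     w_words = wake_word.lower().split()
--
--     if len(t_words) < len(w_words):
--         return False, transcript
--
--     matched = True
--     for i, ww in enumerate(w_words):
--         tw = t_words[i]
--         if tw == ww:
--             continue
--         dist = _edit_distance(tw, ww)
--         # Allow edit distance of 1 for any word
--         if dist <= 1:
--             continue
--         matched = False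
--         break
--
--     if not matched:
--         return False, transcript
--
--     # Reconstruct remaining text preserving original casing
--     # Find where the wake word ends in the original transcript
--     original_words = transcript.split()
--     remaining = " ".join(original_words[len(w_words):]).strip().lstrip(",").strip()
--     return True, remaining
-- ===== SOURCE B (Python) =====
-- def _within_one_edit(a: str, b: str) -> bool:
--     """True iff edit distance between a and b is at most 1 (single pass)."""
--     i = 0
--     while i < len(a) and i < len(b):
--         if a[i] != b[i]:
--             # one edit spent at position i: the rest must match exactly
--             # (substitution, or skip one char of a, or skip one char of b)
--             return a[i + 1:] == b[i + 1:] or a[i:] == b[i + 1:] or a[i + 1:] == b[i:]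
--         i += 1
--     return len(a) - i <= 1 and len(b) - i <= 1
--
--
-- def match_wake_word(transcript: str, wake_word: str) -> tuple[bool, str]:
--     t_words = transcript.lower().split()
--     w_words = wake_word.lower().split()
--
--     if len(t_words) < len(w_words):
--         return False, transcript
--
--     if not all(_within_one_edit(tw, ww) for tw, ww in zip(t_words, w_words)):
--         return False, transcript
--
--     original_words = transcript.split()
--     remaining = " ".join(original_words[len(w_words):]).strip().lstrip(",").strip()
--     return True, remaining
-- ===== Notes on version B (the rewrite author's own statement) =====
-- stated objective: faster
-- what changed: The per-word full Levenshtein DP table is replaced by a single-pass 'edit distance at most one' test (walk to the first mismatch, then one suffix comparison); the outer split/zip/reconstruction logic is unchanged.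
import Mathlib
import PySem

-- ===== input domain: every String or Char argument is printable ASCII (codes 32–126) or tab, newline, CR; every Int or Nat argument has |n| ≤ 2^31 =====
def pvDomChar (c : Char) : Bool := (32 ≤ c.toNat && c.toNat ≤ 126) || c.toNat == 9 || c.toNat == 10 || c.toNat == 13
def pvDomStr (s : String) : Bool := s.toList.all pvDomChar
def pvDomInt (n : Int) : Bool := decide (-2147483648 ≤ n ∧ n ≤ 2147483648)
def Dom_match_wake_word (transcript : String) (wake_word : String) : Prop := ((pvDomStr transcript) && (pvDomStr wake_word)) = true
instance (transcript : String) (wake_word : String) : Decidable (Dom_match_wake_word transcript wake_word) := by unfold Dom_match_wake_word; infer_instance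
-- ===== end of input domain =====

-- B replaces A's per-word Levenshtein DP with a one-pass "at most one edit" test; outer logic unchanged.

-- ===== PORT A =====

-- inner loop of _edit_distance: `for j, cb in enumerate(b)`; walks b and the prev row
-- together (prev' holds prev[j+1:], so prev'.headD is prev[j+1]); `last` is curr[j],
-- the cell appended on the previous iteration; returns the appended cells curr[1:].
def edInner (ca : Char) : List Char → List Nat → Nat → List Nat
  | [], _, _ => []
  | cb :: b', pj :: prev', last =>
      let v := min (min (prev'.headD 0 + 1) (last + 1)) (pj + (if ca ≠ cb then 1 else 0))
      v :: edInner ca b' prev' v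
  | _ :: _, [], _ => []  -- unreachable: prev always has length b.length + 1

-- outer loop: `for i, ca in enumerate(a)`; curr = [i+1] ++ appended cells, prev := curr
def edOuter (b : List Char) : List Char → Nat → List Nat → List Nat
  | [], _, prev => prev
  | ca :: a', i, prev => edOuter b a' (i + 1) ((i + 1) :: edInner ca b prev (i + 1))

-- _edit_distance: the recursive swap call immediately takes the non-swap branch
def pyEditDistance (a b : List Char) : Nat :=
  if a.length < b.length then pyEditDistance b a
  else if b.isEmpty then a.length
  else (edOuter b a 0 (List.range (b.length + 1))).getLastD 0
termination_by (if a.length < b.length then 1 else 0)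
decreasing_by
  rename_i h
  have h' : ¬ b.length < a.length := Nat.lt_asymm h
  simp [h, h']

-- the matching loop of A: `for i, ww in enumerate(w_words)` with early break;
-- t_words[i] is always in range since len(t_words) ≥ len(w_words)
def wakeLoop (t_words : List String) : List String → Nat → Bool
  | [], _ => true
  | ww :: rest, i =>
      let tw := PySem.List.pyGetD t_words (i : Int) ""
      if tw == ww then wakeLoop t_words rest (i + 1)
      else if pyEditDistance tw.toList ww.toList ≤ 1 then wakeLoop t_words rest (i + 1)
      else false

def match_wake_word (transcript : String) (wake_word : String) : Bool × String :=
  let t_words := PySem.Str.split₀ (PySem.Str.lower transcript)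
  let w_words := PySem.Str.split₀ (PySem.Str.lower wake_word)
  if t_words.length < w_words.length then (false, transcript)
  else if !(wakeLoop t_words w_words 0) then (false, transcript)
  else
    let original_words := PySem.Str.split₀ transcript
    -- original_words[len(w_words):] is List.drop (the index is a nonnegative length)
    let joined := PySem.Str.join " " (original_words.drop w_words.length)
    -- .lstrip(",") with a single-char set: drop leading ',' chars (exact)
    let s2 := String.ofList ((PySem.Str.strip joined).toList.dropWhile (fun c => c == ','))
    (true, PySem.Str.strip s2)

-- ===== PORT B =====

-- single pass: walk both words to the first mismatch, then one suffix comparison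
def within1 : List Char → List Char → Bool
  | x :: a, y :: b =>
      if x ≠ y then (a == b) || ((x :: a) == b) || (a == (y :: b))
      else within1 a b
  | a, b => decide (a.length ≤ 1) && decide (b.length ≤ 1)

def match_wake_word_alt (transcript : String) (wake_word : String) : Bool × String :=
  let t_words := PySem.Str.split₀ (PySem.Str.lower transcript)
  let w_words := PySem.Str.split₀ (PySem.Str.lower wake_word)
  if t_words.length < w_words.length then (false, transcript)
  else if !((t_words.zip w_words).all fun p => within1 p.1.toList p.2.toList) then
    (false, transcript)
  else
    let original_words := PySem.Str.split₀ transcript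
    let joined := PySem.Str.join " " (original_words.drop w_words.length)
    let s2 := String.ofList ((PySem.Str.strip joined).toList.dropWhile (fun c => c == ','))
    (true, PySem.Str.strip s2)

-- ===== PRECONDITION & SPEC =====
def Spec_match_wake_word (transcript : String) (wake_word : String) (out : Bool × String) : Prop := out = match_wake_word_alt transcript wake_word
instance (transcript : String) (wake_word : String) (out : Bool × String) : Decidable (Spec_match_wake_word transcript wake_word out) := by unfold Spec_match_wake_word; infer_instance

-- ===== CLAIM (what is proved, stated in full; the proofs are below) =====
def Claim_equal_match_wake_word : Prop := ∀ (transcript : String) (wake_word : String), Dom_match_wake_word transcript wake_word → Spec_match_wake_word transcript wake_word (match_wake_word transcript wake_word)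

-- ===== LEMMAS AND PROOFS =====

-- structural Levenshtein distance (proof-side reference function)
def lev : List Char → List Char → Nat
  | [], b => b.length
  | a :: as, [] => as.length + 1
  | x :: a, y :: b =>
      min (min (lev a (y :: b) + 1) (lev (x :: a) b + 1)) (lev a b + (if x = y then 0 else 1))
termination_by a b => a.length + b.length

-- "a and b are within one edit": equal, one substitution, one deletion, or one insertion
def E (a b : List Char) : Prop :=
  a = b ∨ (∃ p s x y, a = p ++ x :: s ∧ b = p ++ y :: s)
    ∨ (∃ p s x, a = p ++ x :: s ∧ b = p ++ s)
    ∨ (∃ p s y, a = p ++ s ∧ b = p ++ y :: s)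

theorem E_refl (a : List Char) : E a a := Or.inl rfl

theorem E_symm {a b : List Char} (h : E a b) : E b a := by
  rcases h with h | ⟨p, s, x, y, h1, h2⟩ | ⟨p, s, x, h1, h2⟩ | ⟨p, s, y, h1, h2⟩
  · exact Or.inl h.symm
  · exact Or.inr (Or.inl ⟨p, s, y, x, h2, h1⟩)
  · exact Or.inr (Or.inr (Or.inr ⟨p, s, x, h2, h1⟩))
  · exact Or.inr (Or.inr (Or.inl ⟨p, s, y, h2, h1⟩))

theorem E_cons {a b : List Char} (c : Char) (h : E a b) : E (c :: a) (c :: b) := by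
  rcases h with h | ⟨p, s, x, y, h1, h2⟩ | ⟨p, s, x, h1, h2⟩ | ⟨p, s, y, h1, h2⟩
  · exact Or.inl (by rw [h])
  · exact Or.inr (Or.inl ⟨c :: p, s, x, y, by simp [h1], by simp [h2]⟩)
  · exact Or.inr (Or.inr (Or.inl ⟨c :: p, s, x, by simp [h1], by simp [h2]⟩))
  · exact Or.inr (Or.inr (Or.inr ⟨c :: p, s, y, by simp [h1], by simp [h2]⟩))

theorem E_cons_strip {a b : List Char} {c : Char} (h : E (c :: a) (c :: b)) : E a b := by
  rcases h with h | ⟨p, s, x, y, h1, h2⟩ | ⟨p, s, x, h1, h2⟩ | ⟨p, s, y, h1, h2⟩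
  · exact Or.inl (by injection h)
  · cases p with
    | nil =>
        simp at h1 h2
        exact Or.inl (h1.2.trans h2.2.symm)
    | cons d p' =>
        simp at h1 h2
        exact Or.inr (Or.inl ⟨p', s, x, y, h1.2, h2.2⟩)
  · cases p with
    | nil =>
        simp only [List.nil_append] at h1 h2
        injection h1 with hcx has
        subst h2
        exact Or.inr (Or.inr (Or.inl ⟨[], b, c, by simp [has], by simp⟩))
    | cons d p' =>
        simp at h1 h2
        exact Or.inr (Or.inr (Or.inl ⟨p', s, x, h1.2, h2.2⟩))
  · cases p with
    | nil =>
        simp only [List.nil_append] at h1 h2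
        subst h1
        injection h2 with hcy hb
        exact Or.inr (Or.inr (Or.inr ⟨[], a, c, by simp, by simp [hb]⟩))
    | cons d p' =>
        simp at h1 h2
        exact Or.inr (Or.inr (Or.inr ⟨p', s, y, h1.2, h2.2⟩))

theorem E_rev {a b : List Char} (h : E a b) : E a.reverse b.reverse := by
  rcases h with h | ⟨p, s, x, y, h1, h2⟩ | ⟨p, s, x, h1, h2⟩ | ⟨p, s, y, h1, h2⟩
  · exact Or.inl (by rw [h])
  · exact Or.inr (Or.inl ⟨s.reverse, p.reverse, x, y, by simp [h1], by simp [h2]⟩)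
  · exact Or.inr (Or.inr (Or.inl ⟨s.reverse, p.reverse, x, by simp [h1], by simp [h2]⟩))
  · exact Or.inr (Or.inr (Or.inr ⟨s.reverse, p.reverse, y, by simp [h1], by simp [h2]⟩))

theorem E_rev_iff (a b : List Char) : E a.reverse b.reverse ↔ E a b := by
  constructor
  · intro h
    have := E_rev h
    simpa using this
  · exact E_rev

theorem E_nil_right (a : List Char) : E a [] ↔ a.length ≤ 1 := by
  constructor
  · rintro (h | ⟨p, s, x, y, h1, h2⟩ | ⟨p, s, x, h1, h2⟩ | ⟨p, s, y, h1, h2⟩)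
    · simp [h]
    · exact absurd h2 (by simp)
    · rcases List.append_eq_nil_iff.mp h2.symm with ⟨hp, hs⟩
      subst hp; subst hs; subst h1; simp
    · exact absurd h2 (by simp)
  · intro h
    match a, h with
    | [], _ => exact Or.inl rfl
    | [x], _ => exact Or.inr (Or.inr (Or.inl ⟨[], [], x, rfl, rfl⟩))

theorem E_nil_left (b : List Char) : E [] b ↔ b.length ≤ 1 := by
  constructor
  · intro h; exact (E_nil_right b).mp (E_symm h)
  · intro h; exact E_symm ((E_nil_right b).mpr h)

theorem lev_nil_right (a : List Char) : lev a [] = a.length := by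
  cases a <;> simp [lev]

theorem lev_self (a : List Char) : lev a a = 0 := by
  induction a with
  | nil => simp [lev]
  | cons x a ih =>
      have h3 : lev (x :: a) (x :: a) ≤ lev a a + 0 := by
        simp only [lev]
        exact le_trans (Nat.min_le_right _ _) (by simp)
      omega

theorem lev_eq_zero_iff (a b : List Char) : lev a b = 0 ↔ a = b := by
  induction a generalizing b with
  | nil =>
      cases b <;> simp [lev]
  | cons x a ih =>
      cases b with
      | nil => simp [lev]
      | cons y b =>
          constructor
          · intro h
            simp only [lev] at h
            have h3 : lev a b + (if x = y then 0 else 1) = 0 := by omega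
            by_cases hxy : x = y
            · simp [hxy] at h3
              rw [hxy, (ih b).mp h3]
            · simp [hxy] at h3
          · intro h
            injection h with h1 h2
            subst h1; subst h2
            exact lev_self (x :: a)

theorem lev_third {x y : Char} {a b : List Char} :
    lev (x :: a) (y :: b) ≤ lev a b + (if x = y then 0 else 1) := by
  simp only [lev]
  exact Nat.min_le_right _ _

theorem lev_sub (p s : List Char) (x y : Char) : lev (p ++ x :: s) (p ++ y :: s) ≤ 1 := by
  induction p with
  | nil =>
      simp only [List.nil_append]
      have := @lev_third x y s s
      rw [lev_self] at this
      split_ifs at this <;> omega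
  | cons c p ih =>
      have := @lev_third c c (p ++ x :: s) (p ++ y :: s)
      simp at this
      simpa using le_trans this ih

theorem lev_del (p s : List Char) (x : Char) : lev (p ++ x :: s) (p ++ s) ≤ 1 := by
  induction p with
  | nil =>
      simp only [List.nil_append]
      cases s with
      | nil => simp [lev]
      | cons y s' =>
          have h1 : lev (x :: y :: s') (y :: s') ≤ lev (y :: s') (y :: s') + 1 := by
            simp only [lev]
            exact le_trans (Nat.min_le_left _ _) (Nat.min_le_left _ _)
          rw [lev_self] at h1
          omega
  | cons c p ih =>
      have := @lev_third c c (p ++ x :: s) (p ++ s)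
      simp at this
      simpa using le_trans this ih

theorem lev_ins (p s : List Char) (y : Char) : lev (p ++ s) (p ++ y :: s) ≤ 1 := by
  induction p with
  | nil =>
      simp only [List.nil_append]
      cases s with
      | nil => simp [lev]
      | cons x s' =>
          have h1 : lev (x :: s') (y :: x :: s') ≤ lev (x :: s') (x :: s') + 1 := by
            simp only [lev]
            exact le_trans (Nat.min_le_left _ _) (Nat.min_le_right _ _)
          rw [lev_self] at h1
          omega
  | cons c p ih =>
      have := @lev_third c c (p ++ s) (p ++ y :: s)
      simp at this
      simpa using le_trans this ih

theorem lev_le_one_iff (a b : List Char) : lev a b ≤ 1 ↔ E a b := by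
  constructor
  · intro h
    induction a generalizing b with
    | nil =>
        have : b.length ≤ 1 := by simpa [lev] using h
        exact (E_nil_left b).mpr this
    | cons x a ih =>
        cases b with
        | nil =>
            have : (x :: a).length ≤ 1 := by
              rw [← lev_nil_right (x :: a)]; exact h
            exact (E_nil_right _).mpr this
        | cons y b =>
            simp only [lev] at h
            have hcases : lev a (y :: b) = 0 ∨ lev (x :: a) b = 0 ∨
                lev a b + (if x = y then 0 else 1) ≤ 1 := by omega
            rcases hcases with h0 | h0 | h0
            · have := (lev_eq_zero_iff _ _).mp h0
              exact Or.inr (Or.inr (Or.inl ⟨[], y :: b, x, by simp [this], rfl⟩))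
            · have := (lev_eq_zero_iff _ _).mp h0
              exact Or.inr (Or.inr (Or.inr ⟨[], x :: a, y, rfl, by simp [this]⟩))
            · by_cases hxy : x = y
              · subst hxy
                simp at h0
                exact E_cons x (ih b h0)
              · simp [hxy] at h0
                have := (lev_eq_zero_iff _ _).mp h0
                exact Or.inr (Or.inl ⟨[], b, x, y, by simp [this], rfl⟩)
  · rintro (h | ⟨p, s, x, y, h1, h2⟩ | ⟨p, s, x, h1, h2⟩ | ⟨p, s, y, h1, h2⟩)
    · subst h; rw [lev_self]; omega
    · subst h1; subst h2; exact lev_sub p s x y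
    · subst h1; subst h2; exact lev_del p s x
    · subst h1; subst h2; exact lev_ins p s y

-- ---- B's within1 computes E ----
theorem within1_iff_E (a b : List Char) : within1 a b = true ↔ E a b := by
  induction a generalizing b with
  | nil =>
      simp only [within1]
      cases b <;> simp [E_nil_left, List.length]
  | cons x a ih =>
      cases b with
      | nil =>
          simp only [within1]
          rw [E_nil_right]
          simp
      | cons y b =>
          by_cases hxy : x = y
          · subst hxy
            rw [show within1 (x :: a) (x :: b) = within1 a b by simp [within1]]
            rw [ih b]
            exact ⟨E_cons x, E_cons_strip⟩
          · rw [show within1 (x :: a) (y :: b) =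
                ((a == b) || ((x :: a) == b) || (a == (y :: b))) by simp [within1, hxy]]
            constructor
            · intro h
              simp only [Bool.or_eq_true, beq_iff_eq] at h
              rcases h with (h | h) | h
              · exact Or.inr (Or.inl ⟨[], b, x, y, by simp [h], rfl⟩)
              · exact Or.inr (Or.inr (Or.inr ⟨[], x :: a, y, rfl, by simp [h]⟩))
              · exact Or.inr (Or.inr (Or.inl ⟨[], y :: b, x, by simp [h], rfl⟩))
            · rintro (h | ⟨p, s, u, v, h1, h2⟩ | ⟨p, s, u, h1, h2⟩ | ⟨p, s, v, h1, h2⟩)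
              · exact absurd (by injection h) hxy
              · cases p with
                | nil =>
                    simp at h1 h2
                    simp [h1.2, h2.2]
                | cons c p' =>
                    simp at h1 h2
                    exact absurd (h1.1.trans h2.1.symm) hxy
              · cases p with
                | nil =>
                    simp at h1 h2
                    simp [h1.2, ← h2]
                | cons c p' =>
                    simp at h1 h2
                    exact absurd (h1.1.trans h2.1.symm) hxy
              · cases p with
                | nil =>
                    simp at h1 h2
                    simp [h2.2, ← h1]
                | cons c p' =>
                    simp at h1 h2
                    exact absurd (h1.1.trans h2.1.symm) hxy

-- ---- DP row invariant ----

-- the row of lev-values: cell j is lev vu (reverse of the first j chars of bs, on top of q)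
def levRow (vu q : List Char) : List Char → List Nat
  | [] => [lev vu q]
  | cb :: bs => lev vu q :: levRow vu (cb :: q) bs

theorem levRow_eq_head_cons_tail (vu q bs : List Char) :
    levRow vu q bs = lev vu q :: (levRow vu q bs).tail := by
  cases bs <;> simp [levRow]

theorem edInner_levRow (x : Char) (bs : List Char) :
    ∀ q : List Char, ∀ vu : List Char,
      edInner x bs (levRow vu q bs) (lev (x :: vu) q) = (levRow (x :: vu) q bs).tail := by
  induction bs with
  | nil => intro q vu; simp [levRow, edInner]
  | cons cb bs' ih =>
      intro q vu
      rw [show levRow vu q (cb :: bs') = lev vu q :: levRow vu (cb :: q) bs' from rfl]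
      rw [show levRow (x :: vu) q (cb :: bs') = lev (x :: vu) q :: levRow (x :: vu) (cb :: q) bs'
        from rfl]
      simp only [edInner, List.tail_cons]
      have hhead : (levRow vu (cb :: q) bs').headD 0 = lev vu (cb :: q) := by
        rw [levRow_eq_head_cons_tail]; rfl
      have hv : min (min ((levRow vu (cb :: q) bs').headD 0 + 1) (lev (x :: vu) q + 1))
          (lev vu q + (if x ≠ cb then 1 else 0)) = lev (x :: vu) (cb :: q) := by
        rw [hhead]
        have hc : (if x ≠ cb then 1 else 0) = (if x = cb then 0 else 1) := by
          by_cases h : x = cb <;> simp [h]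
        rw [hc]
        simp [lev]
      rw [hv, ih (cb :: q) vu]
      rw [levRow_eq_head_cons_tail (x :: vu) (cb :: q) bs']
      simp

theorem edOuter_levRow (b : List Char) (as : List Char) :
    ∀ vu : List Char, edOuter b as vu.length (levRow vu [] b) = levRow (as.reverse ++ vu) [] b := by
  induction as with
  | nil => intro vu; simp [edOuter]
  | cons ca as' ih =>
      intro vu
      simp only [edOuter]
      have hlen : vu.length + 1 = lev (ca :: vu) [] := by
        rw [lev_nil_right]; simp
      have hstep : (vu.length + 1) :: edInner ca b (levRow vu [] b) (vu.length + 1) =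
          levRow (ca :: vu) [] b := by
        rw [hlen, edInner_levRow ca b [] vu]
        exact (levRow_eq_head_cons_tail (ca :: vu) [] b).symm
      rw [hstep]
      have := ih (ca :: vu)
      simp only [List.length_cons] at this
      rw [this]
      simp

theorem levRow_nil_range (bs : List Char) :
    ∀ q : List Char, levRow [] q bs = List.range' q.length (bs.length + 1) := by
  induction bs with
  | nil => intro q; simp [levRow, lev, List.range']
  | cons cb bs' ih =>
      intro q
      simp only [levRow]
      rw [ih (cb :: q)]
      rw [show lev [] q = q.length by simp [lev]]
      simp [List.range'_succ]

theorem levRow_getLastD (bs : List Char) :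
    ∀ q vu : List Char, ∀ d : Nat, (levRow vu q bs).getLastD d = lev vu (bs.reverse ++ q) := by
  induction bs with
  | nil => intro q vu d; simp [levRow]
  | cons cb bs' ih =>
      intro q vu d
      simp only [levRow, List.getLastD_cons]
      rw [ih (cb :: q) vu]
      simp

theorem ed_core_eq (a b : List Char) :
    (edOuter b a 0 (List.range (b.length + 1))).getLastD 0 = lev a.reverse b.reverse := by
  have h0 : List.range (b.length + 1) = levRow [] [] b := by
    rw [levRow_nil_range b []]
    simp [List.range_eq_range']
  rw [h0]
  have := edOuter_levRow b a []
  simp only [List.length_nil] at this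
  rw [this]
  rw [levRow_getLastD]
  simp

theorem pyEditDistance_le_one_iff (a b : List Char) : pyEditDistance a b ≤ 1 ↔ E a b := by
  rw [pyEditDistance]
  by_cases h : a.length < b.length
  · rw [if_pos h, pyEditDistance]
    rw [if_neg (Nat.lt_asymm h)]
    by_cases ha : a.isEmpty
    · rw [if_pos ha]
      have : a = [] := by cases a <;> simp_all
      subst this
      exact (E_nil_left b).symm
    · rw [if_neg ha, ed_core_eq]
      rw [lev_le_one_iff, E_rev_iff]
      exact ⟨E_symm, E_symm⟩
  · rw [if_neg h]
    by_cases hb : b.isEmpty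
    · rw [if_pos hb]
      have : b = [] := by cases b <;> simp_all
      subst this
      exact (E_nil_right a).symm
    · rw [if_neg hb, ed_core_eq]
      rw [lev_le_one_iff, E_rev_iff]

-- A's per-word acceptance equals B's within1
theorem word_ok_eq (tw ww : String) :
    ((tw == ww) || decide (pyEditDistance tw.toList ww.toList ≤ 1)) =
      within1 tw.toList ww.toList := by
  by_cases h : tw = ww
  · subst h
    have : within1 tw.toList tw.toList = true :=
      (within1_iff_E _ _).mpr (E_refl _)
    simp [this]
  · have hne : (tw == ww) = false := by simp [h]
    rw [hne, Bool.false_or]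
    by_cases hd : pyEditDistance tw.toList ww.toList ≤ 1
    · simp [hd, (within1_iff_E _ _).mpr ((pyEditDistance_le_one_iff _ _).mp hd)]
    · have : within1 tw.toList ww.toList = false := by
        cases hw : within1 tw.toList ww.toList
        · rfl
        · exact absurd ((pyEditDistance_le_one_iff _ _).mpr ((within1_iff_E _ _).mp hw)) hd
      simp [hd, this]

theorem wake_if_chain (c : Bool) (P : Prop) [Decidable P] (r : Bool) :
    (if c then r else if P then r else false) = ((c || decide P) && r) := by
  by_cases hP : P <;> cases c <;> simp [hP]

theorem wakeLoop_eq (ws : List String) :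
    ∀ (t : List String) (i : Nat), i + ws.length ≤ t.length →
      wakeLoop t ws i = ((t.drop i).zip ws).all (fun p => within1 p.1.toList p.2.toList) := by
  induction ws with
  | nil => intro t i h; simp [wakeLoop]
  | cons ww rest ih =>
      intro t i h
      have hi : i < t.length := by simp at h; omega
      have hdrop : t.drop i = t[i] :: t.drop (i + 1) := List.drop_eq_getElem_cons hi
      have hget : PySem.List.pyGetD t (i : Int) "" = t[i] := by
        simp [PySem.List.pyGetD, PySem.List.pyGet?, PySem.List.pyIdx?, hi]
      simp only [wakeLoop, hget]
      rw [wake_if_chain]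
      rw [word_ok_eq]
      have hrest : wakeLoop t rest (i + 1) =
          ((t.drop (i + 1)).zip rest).all (fun p => within1 p.1.toList p.2.toList) := by
        apply ih
        simp at h ⊢; omega
      rw [hrest, hdrop]
      simp only [List.zip_cons_cons, List.all_cons]

theorem match_wake_word_eq (transcript wake_word : String) :
    match_wake_word transcript wake_word = match_wake_word_alt transcript wake_word := by
  unfold match_wake_word match_wake_word_alt
  by_cases hlen : (PySem.Str.split₀ (PySem.Str.lower transcript)).length <
      (PySem.Str.split₀ (PySem.Str.lower wake_word)).length
  · simp only [if_pos hlen]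
  · have hloop := wakeLoop_eq (PySem.Str.split₀ (PySem.Str.lower wake_word))
      (PySem.Str.split₀ (PySem.Str.lower transcript)) 0 (by omega)
    simp only [List.drop_zero] at hloop
    simp only [if_neg hlen, hloop]

-- ===== VERDICT (by name: the statement is the Claim_ definition above) =====
theorem match_wake_word_spec : Claim_equal_match_wake_word := by
  intro transcript wake_word _
  exact match_wake_word_eq transcript wake_word
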